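-- pv_equiv track=rewrite | github.com/prabhat1081/Automated-Fact-Checking | codes_json/extractors/reporting.py | isOrder
-- ===== SOURCE A (Python) =====
-- best_order_words = ['commanded', 'ordered', 'warned', 'advised', 'invited', 'forbade', 'prohibited', 'suggested']
--
-- def isOrder(sentence):
-- 	sentence = sentence.lower().strip().split(' ')
-- 	pos = -1
-- 	i = 0
-- 	for word in sentence:
-- 		if word in best_order_words:
-- 			pos = i
-- 		i+=1
-- 	if pos == -1:
-- 		return False
-- 	sentence = sentence[pos:]
-- 	if 'to' in sentence:
-- 		return True
-- 	return False
-- ===== SOURCE B (Python) =====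
-- best_order_words = ['commanded', 'ordered', 'warned', 'advised', 'invited', 'forbade', 'prohibited', 'suggested']
--
-- def isOrder(sentence):
-- 	words = sentence.lower().strip().split(' ')
-- 	seen_to = False
-- 	for word in reversed(words):
-- 		if word == 'to':
-- 			seen_to = True
-- 		if word in best_order_words:
-- 			return seen_to
-- 	return False
-- ===== Notes on version B (the rewrite author's own statement) =====
-- stated objective: simpler
-- what changed: Replaces A's two-phase scan (index-tracking pass to find the last order word, then a slice and a membership scan for 'to') by a single reverse traversal that tracks whether 'to' has been seen and returns at the first order word encountered.
import Mathlib
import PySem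

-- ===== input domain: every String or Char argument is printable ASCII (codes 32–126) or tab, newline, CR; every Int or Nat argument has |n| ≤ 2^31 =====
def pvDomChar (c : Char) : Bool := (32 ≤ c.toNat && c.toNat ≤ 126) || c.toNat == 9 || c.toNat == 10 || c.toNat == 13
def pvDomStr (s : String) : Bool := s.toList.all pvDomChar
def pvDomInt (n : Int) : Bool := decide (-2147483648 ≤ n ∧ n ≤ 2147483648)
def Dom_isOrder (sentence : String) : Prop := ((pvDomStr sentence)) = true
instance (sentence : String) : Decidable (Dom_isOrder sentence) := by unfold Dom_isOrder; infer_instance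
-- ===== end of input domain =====

-- B replaces A's two-phase scan (find last order-word index, slice, then search 'to') by a
-- single reverse traversal tracking a seen-'to' flag; same cost, simpler single pass.


-- ===== PORT A =====
def bestOrderWords : List String :=
  ["commanded", "ordered", "warned", "advised", "invited", "forbade", "prohibited", "suggested"]

-- sentence.lower().strip().split(' '): split? is total here since the separator " " is nonempty
def pvWords (s : String) : List String :=
  (PySem.Str.split? (PySem.Str.strip (PySem.Str.lower s)) " ").getD []

def isOrder (sentence : String) : Bool :=
  let ws := pvWords sentence
  let pos := (ws.foldl (fun (acc : Int × Int) word =>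
      (if bestOrderWords.contains word then acc.2 else acc.1, acc.2 + 1)) (-1, 0)).1
  if pos = -1 then false
  else
    let ws2 := PySem.List.slice ws (some pos) none
    if ws2.contains "to" then true else false

-- ===== PORT B =====
def isOrderGo : List String → Bool → Bool
  | [], _ => false
  | word :: rest, seenTo =>
    let seenTo := if word == "to" then true else seenTo
    if bestOrderWords.contains word then seenTo else isOrderGo rest seenTo

def isOrder_alt (sentence : String) : Bool :=
  isOrderGo (pvWords sentence).reverse false

-- ===== PRECONDITION & SPEC =====
def Spec_isOrder (sentence : String) (out : Bool) : Prop := out = isOrder_alt sentence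
instance (sentence : String) (out : Bool) : Decidable (Spec_isOrder sentence out) := by unfold Spec_isOrder; infer_instance

-- ===== CLAIM (what is proved, stated in full; the proofs are below) =====
def Claim_equal_isOrder : Prop := ∀ (sentence : String), Dom_isOrder sentence → Spec_isOrder sentence (isOrder sentence)

-- ===== LEMMAS AND PROOFS =====

def lastOrderIdx : List String → Option Nat
  | [] => none
  | w :: ws =>
    match lastOrderIdx ws with
    | some k => some (k + 1)
    | none => if bestOrderWords.contains w then some 0 else none

theorem lastOrderIdx_lt_length (ws : List String) (k : Nat)
    (h : lastOrderIdx ws = some k) : k < ws.length := by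
  induction ws generalizing k with
  | nil => simp [lastOrderIdx] at h
  | cons w ws ih =>
    simp only [lastOrderIdx] at h
    cases hl : lastOrderIdx ws with
    | some j =>
      rw [hl] at h
      simp only [Option.some.injEq] at h
      have hj := ih j hl
      simp only [List.length_cons]
      omega
    | none =>
      rw [hl] at h
      by_cases hw : bestOrderWords.contains w = true
      · rw [if_pos hw] at h
        simp only [Option.some.injEq] at h
        simp only [List.length_cons]
        omega
      · rw [if_neg hw] at h
        simp at h

theorem lastOrderIdx_append_singleton (ws : List String) (w : String) :
    lastOrderIdx (ws ++ [w]) =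
      if bestOrderWords.contains w then some ws.length else lastOrderIdx ws := by
  induction ws with
  | nil => simp [lastOrderIdx]
  | cons x ws ih =>
    by_cases hw : bestOrderWords.contains w = true <;>
      cases hl : lastOrderIdx ws <;>
      simp_all [List.cons_append, lastOrderIdx]

theorem foldl_pos_eq (ws : List String) (p i : Int) :
    (ws.foldl (fun (acc : Int × Int) word =>
        (if bestOrderWords.contains word then acc.2 else acc.1, acc.2 + 1)) (p, i)).1 =
      match lastOrderIdx ws with
      | some k => i + k
      | none => p := by
  induction ws generalizing p i with
  | nil => simp [lastOrderIdx]
  | cons w ws ih =>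
    cases hl : lastOrderIdx ws with
    | some k =>
      simp only [List.foldl_cons, lastOrderIdx, hl, ih]
      push_cast; ring
    | none =>
      simp only [List.foldl_cons, lastOrderIdx, hl, ih]
      split <;> simp

theorem beqSymmStr (a b : String) : (a == b) = (b == a) := by
  by_cases h : a = b
  · rw [h]
  · rw [beq_eq_false_iff_ne.mpr h, beq_eq_false_iff_ne.mpr (Ne.symm h)]

theorem order_word_ne_to (w : String) (h : bestOrderWords.contains w = true) :
    w ≠ "to" := by
  simp only [bestOrderWords, List.contains_cons, List.contains_nil] at h
  simp only [Bool.or_eq_true, beq_iff_eq] at h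
  rcases h with h|h|h|h|h|h|h|h|h <;> simp_all

theorem isOrderGo_reverse (ws : List String) (seen : Bool) :
    isOrderGo ws.reverse seen =
      match lastOrderIdx ws with
      | some k => seen || (ws.drop k).contains "to"
      | none => false := by
  induction ws using List.reverseRecOn generalizing seen with
  | nil => simp [isOrderGo, lastOrderIdx]
  | append_singleton ws w ih =>
    rw [List.reverse_append, List.reverse_singleton, List.singleton_append,
      lastOrderIdx_append_singleton]
    by_cases hw : bestOrderWords.contains w = true
    · have hmem : w ∈ bestOrderWords := by simpa using hw
      have hwne : w ≠ "to" := order_word_ne_to w hw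
      simp [isOrderGo, hmem, hwne, Ne.symm hwne]
    · have hw' : bestOrderWords.contains w = false := by simp_all
      simp only [isOrderGo, hw', Bool.false_eq_true, if_false]
      rw [ih]
      cases hl : lastOrderIdx ws with
      | none => rfl
      | some k =>
        have hk := lastOrderIdx_lt_length ws k hl
        have hdrop : (ws ++ [w]).drop k = ws.drop k ++ [w] :=
          List.drop_append_of_le_length (by omega)
        simp only [hdrop, List.contains_append, List.contains_cons, List.contains_nil,
          beqSymmStr "to" w]
        cases seen <;> cases h : (w == "to") <;> simp_all

theorem isOrder_eq_alt (s : String) : isOrder s = isOrder_alt s := by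
  simp only [isOrder, isOrder_alt]
  rw [isOrderGo_reverse, foldl_pos_eq]
  cases hl : lastOrderIdx (pvWords s) with
  | none => simp
  | some k =>
    have hslice : PySem.List.slice (pvWords s) (some ((0 : Int) + (k : Int))) none
        = (pvWords s).drop k := by
      rw [show ((0 : Int) + (k : Int)) = ((k : Nat) : Int) by ring,
        PySem.List.slice_from _ (Int.natCast_nonneg k)]
      simp
    rw [if_neg (show ¬((0 : Int) + (k : Int) = -1) by omega), hslice]
    simp only [Bool.false_or]
    cases (List.drop k (pvWords s)).contains "to" <;> simp

-- ===== VERDICT =====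
theorem isOrder_spec : Claim_equal_isOrder := by
  intro s _
  unfold Spec_isOrder
  exact isOrder_eq_alt s
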